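-- pv_equiv track=rewrite | github.com/Gi1ia/TechNoteBook | Algorithm/325_Maximum_Size_Subarray_Sum_Equals_k.py | maxSubArrayLen_II
-- ===== SOURCE A (Python) =====
-- def maxSubArrayLen_II(nums, k):
--     """
--     :type nums: List[int]
--     :type k: int
--     :rtype: int
--     """
--
--     if not nums:
--         return 0
--
--     l = len(nums)
--     acc = [0 for x in range(l)]
--     accMap = {}
--     res = 0
--
--     accMap[0] = -1 # if a acc[i] == 0, we can regard it was from start of the array
--
--     for i in range(l):
--         if i == 0:
--             acc[i] = nums[i]
--         else:
--             acc[i] = acc[i - 1] + nums[i]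
--         if acc[i] not in accMap:
--             accMap[acc[i]] = i
--
--     for i in range(l):
--         if acc[i] - k in accMap:
--             res = max(res, i - accMap[acc[i] - k])
--
--
--     return res
-- ===== SOURCE B (Python) =====
-- def maxSubArrayLen_II(nums, k):
--     res = 0
--     s = 0
--     seen = {0: -1}
--     for i, x in enumerate(nums):
--         s += x
--         if s - k in seen:
--             res = max(res, i - seen[s - k])
--         if s not in seen:
--             seen[s] = i
--     return res
-- ===== Notes on version B (the rewrite author's own statement) =====
-- stated objective: idiomatic
-- what changed: Replaced A's two passes (precompute the full prefix-sum array and its first-occurrence dict, then scan again) by the canonical single pass that maintains the running sum and the first-occurrence dict incrementally, checking sum-k before inserting sum; the prefix array and the second loop disappear.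
import Mathlib
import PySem

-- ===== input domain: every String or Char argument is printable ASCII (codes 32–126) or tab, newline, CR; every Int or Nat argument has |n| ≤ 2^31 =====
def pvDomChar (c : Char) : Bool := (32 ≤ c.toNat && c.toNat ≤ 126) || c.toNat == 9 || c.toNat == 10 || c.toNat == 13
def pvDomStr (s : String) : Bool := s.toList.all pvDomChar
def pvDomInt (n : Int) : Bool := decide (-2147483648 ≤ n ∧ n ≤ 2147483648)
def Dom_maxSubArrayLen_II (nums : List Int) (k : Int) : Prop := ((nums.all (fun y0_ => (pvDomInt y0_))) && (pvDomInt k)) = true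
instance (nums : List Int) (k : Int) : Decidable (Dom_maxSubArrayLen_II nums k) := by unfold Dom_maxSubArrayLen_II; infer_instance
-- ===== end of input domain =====

-- B replaces A's two passes (prefix-sum array + full first-occurrence dict, then a second scan)
-- by the canonical single pass that maintains the running sum and first-occurrence dict incrementally (idiomatic; same O(n) cost).

-- ===== PORT A =====
def maxSubArrayLen_II (nums : List Int) (k : Int) : Int :=
  if nums = [] then 0
  else
    let l : Int := nums.length
    let p := (PySem.List.pyRange 0 l 1).foldl
      (fun (st : List Int × PySem.Dict Int Int) i =>
        -- in-range indexing: pyGetD is exact here (0 ≤ i < len(nums); 0 ≤ i-1 < len(acc) in the else branch)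
        let v := if i == 0 then PySem.List.pyGetD nums i 0
                 else PySem.List.pyGetD st.1 (i-1) 0 + PySem.List.pyGetD nums i 0
        (st.1 ++ [v], if st.2.contains v then st.2 else st.2.insert v i))
      ([], (PySem.Dict.empty : PySem.Dict Int Int).insert 0 (-1))
    (PySem.List.pyRange 0 l 1).foldl
      (fun res i =>
        match p.2.get? (PySem.List.pyGetD p.1 i 0 - k) with
        | some m => max res (i - m)
        | none => res) 0

-- ===== PORT B =====
def maxSubArrayLen_II_alt (nums : List Int) (k : Int) : Int :=
  let st := (PySem.List.enumerate nums).foldl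
    (fun (st : Int × Int × PySem.Dict Int Int) p =>
      let s := st.2.1 + p.2
      let res := match st.2.2.get? (s - k) with
        | some m => max st.1 (p.1 - m)
        | none => st.1
      (res, s, if st.2.2.contains s then st.2.2 else st.2.2.insert s p.1))
    (0, 0, (PySem.Dict.empty : PySem.Dict Int Int).insert 0 (-1))
  st.1

-- ===== PRECONDITION & SPEC =====
def Spec_maxSubArrayLen_II (nums : List Int) (k : Int) (out : Int) : Prop := out = maxSubArrayLen_II_alt nums k
instance (nums : List Int) (k : Int) (out : Int) : Decidable (Spec_maxSubArrayLen_II nums k out) := by unfold Spec_maxSubArrayLen_II; infer_instance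

-- ===== CLAIM (what is proved, stated in full; the proofs are below) =====
def Claim_equal_maxSubArrayLen_II : Prop := ∀ (nums : List Int) (k : Int), Dom_maxSubArrayLen_II nums k → Spec_maxSubArrayLen_II nums k (maxSubArrayLen_II nums k)

-- ===== LEMMAS AND PROOFS =====

/-- Prefix sum of the first `j` elements (`P j`). -/
def pvPref (nums : List Int) (j : Nat) : Int := (nums.take j).sum

/-- First `j ∈ [0, n]` with `P j = v` (the dicts map `v` to that `j - 1`). -/
def pvFirst (nums : List Int) (n : Nat) (v : Int) : Option Nat :=
  (List.range (n+1)).find? (fun j => pvPref nums j == v)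

/-- A's `acc` list after `m` iterations. -/
def pvAcc (nums : List Int) (m : Nat) : List Int := (List.range m).map (fun i => pvPref nums (i+1))

/-- The dict after the prefix sums `P 1 … P m` have been inserted-if-absent over `{0 ↦ -1}`. -/
def pvDInv (nums : List Int) (m : Nat) (d : PySem.Dict Int Int) : Prop :=
  ∀ v, d.get? v = Option.map (fun j : Nat => (j:Int) - 1) (pvFirst nums m v)

/-- The result accumulator after `m` steps, looking prefixes up within bound `bnd i`
    (`bnd = const l` for A, `bnd = id` for B). -/
def pvRes (nums : List Int) (k : Int) (bnd : Nat → Nat) (m : Nat) : Int :=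
  (List.range m).foldl (fun r i =>
    match pvFirst nums (bnd i) (pvPref nums (i+1) - k) with
    | some j => max r ((i:Int) - ((j:Int) - 1))
    | none => r) 0

/-- A's loop-1 step. -/
def pvStepA (nums : List Int) (st : List Int × PySem.Dict Int Int) (i : Int) :
    List Int × PySem.Dict Int Int :=
  let v := if i == 0 then PySem.List.pyGetD nums i 0
           else PySem.List.pyGetD st.1 (i-1) 0 + PySem.List.pyGetD nums i 0
  (st.1 ++ [v], if st.2.contains v then st.2 else st.2.insert v i)

/-- B's loop step. -/
def pvStepB (k : Int) (st : Int × Int × PySem.Dict Int Int) (p : Int × Int) :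
    Int × Int × PySem.Dict Int Int :=
  let s := st.2.1 + p.2
  let res := match st.2.2.get? (s - k) with
    | some m => max st.1 (p.1 - m)
    | none => st.1
  (res, s, if st.2.2.contains s then st.2.2 else st.2.2.insert s p.1)

lemma pvPref_succ (nums : List Int) (m : Nat) :
    pvPref nums (m+1) = pvPref nums m + nums.getD m 0 := by
  simp only [pvPref, List.take_add_one, List.sum_append, List.getD]
  cases h : nums[m]? <;> simp

lemma pvFirst_succ (nums : List Int) (m : Nat) (v : Int) :
    pvFirst nums (m+1) v =
      (pvFirst nums m v).or (if pvPref nums (m+1) = v then some (m+1) else none) := by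
  unfold pvFirst
  rw [List.range_succ, List.find?_append]
  congr 1
  by_cases h : pvPref nums (m+1) = v
  · simp [h]
  · have hb : (pvPref nums (m+1) == v) = false := by simp [h]
    simp [List.find?, hb, h]

lemma pvFirst_eq_some (nums : List Int) (n : Nat) (v : Int) (j : Nat)
    (h : pvFirst nums n v = some j) : j ≤ n ∧ pvPref nums j = v := by
  constructor
  · have h2 := List.mem_range.mp (List.mem_of_find?_eq_some h)
    omega
  · have h1 := List.find?_some h
    simpa using h1

lemma pvFirst_eq_none (nums : List Int) (n : Nat) (v : Int)
    (h : pvFirst nums n v = none) : ∀ j, j ≤ n → pvPref nums j ≠ v := by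
  intro j hj
  have := List.find?_eq_none.mp h j (by simp; omega)
  simpa using this

lemma pvFirst_mono (nums : List Int) (m n : Nat) (v : Int) (j : Nat)
    (hmn : m ≤ n) (h : pvFirst nums m v = some j) : pvFirst nums n v = some j := by
  unfold pvFirst at *
  have : n + 1 = (m + 1) + (n - m) := by omega
  rw [this, List.range_add, List.find?_append, h]
  rfl

lemma pvDInv_zero (nums : List Int) :
    pvDInv nums 0 ((PySem.Dict.empty : PySem.Dict Int Int).insert 0 (-1)) := by
  intro v
  rw [PySem.Dict.get?_insert]
  have h1 : pvFirst nums 0 v = if (0:Int) = v then some 0 else none := by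
    have h0 : pvPref nums 0 = 0 := rfl
    by_cases h : (0:Int) = v
    · simp [pvFirst, List.range_succ, h0, h]
    · have hb : ((0:Int) == v) = false := by simp [h]
      simp [pvFirst, List.range_succ, List.find?, h0, hb, h]
  rw [h1]
  by_cases h : v = 0
  · simp [h]
  · rw [if_neg h, if_neg (fun hv => h hv.symm)]
    simp [PySem.Dict.get?_empty]

lemma pvDInv_step (nums : List Int) (m : Nat) (d : PySem.Dict Int Int)
    (hd : pvDInv nums m d) :
    pvDInv nums (m+1)
      (if d.contains (pvPref nums (m+1)) then d else d.insert (pvPref nums (m+1)) (m:Int)) := by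
  intro v
  have hc : d.contains (pvPref nums (m+1)) = (pvFirst nums m (pvPref nums (m+1))).isSome := by
    rw [PySem.Dict.contains_eq_isSome_get?, hd]; cases pvFirst nums m (pvPref nums (m+1)) <;> rfl
  rw [pvFirst_succ]
  by_cases hin : d.contains (pvPref nums (m+1)) = true
  · rw [if_pos hin, hd]
    rw [hc] at hin
    cases hf : pvFirst nums m v with
    | some j => simp [Option.or]
    | none =>
      simp only [Option.or, Option.map]
      by_cases hv : pvPref nums (m+1) = v
      · exfalso; rw [hv] at hin; rw [hf] at hin; simp at hin
      · simp [hv]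
  · rw [if_neg hin, PySem.Dict.get?_insert]
    rw [hc] at hin
    simp only [Bool.not_eq_true, Option.isSome_eq_false_iff, Option.isNone_iff_eq_none] at hin
    by_cases hv : v = pvPref nums (m+1)
    · rw [if_pos hv]
      rw [hv, hin]
      simp only [Option.or, Option.map]
      congr 1
      push_cast; ring
    · rw [if_neg hv, hd]
      have : (if pvPref nums (m+1) = v then some (m+1) else none) = none := by
        rw [if_neg (fun h => hv h.symm)]
      rw [this]
      cases pvFirst nums m v <;> rfl

lemma pvAcc_getD (nums : List Int) (l i : Nat) (hi : i < l) :
    (pvAcc nums l).getD i 0 = pvPref nums (i+1) := by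
  rw [List.getD_eq_getElem?_getD]
  simp [pvAcc, hi]

lemma pvRes_succ (nums : List Int) (k : Int) (bnd : Nat → Nat) (m : Nat) :
    pvRes nums k bnd (m+1) =
      match pvFirst nums (bnd m) (pvPref nums (m+1) - k) with
      | some j => max (pvRes nums k bnd m) ((m:Int) - ((j:Int) - 1))
      | none => pvRes nums k bnd m := by
  rw [pvRes, List.range_succ, List.foldl_append]
  simp only [List.foldl_cons, List.foldl_nil]
  cases pvFirst nums (bnd m) (pvPref nums (m+1) - k) <;> rfl

/-- A's first loop, re-indexed over `List.range`. -/
def pvLoop1 (nums : List Int) (m : Nat) : List Int × PySem.Dict Int Int :=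
  (List.range m).foldl (fun st (j : Nat) => pvStepA nums st (j:Int))
    ([], (PySem.Dict.empty : PySem.Dict Int Int).insert 0 (-1))

/-- A's first loop computes `pvAcc` and a dict satisfying `pvDInv`. -/
lemma portA_loop1 (nums : List Int) (m : Nat) :
    (pvLoop1 nums m).1 = pvAcc nums m ∧ pvDInv nums m (pvLoop1 nums m).2 := by
  unfold pvLoop1
  induction m with
  | zero => exact ⟨rfl, pvDInv_zero nums⟩
  | succ m ih =>
    rw [List.range_succ, List.foldl_append]
    obtain ⟨h1, h2⟩ := ih
    set st := (List.range m).foldl (fun st (j : Nat) => pvStepA nums st (j:Int))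
        ([], (PySem.Dict.empty : PySem.Dict Int Int).insert 0 (-1)) with hst
    simp only [List.foldl_cons, List.foldl_nil]
    have hv : (if (m:Int) == 0 then PySem.List.pyGetD nums (m:Int) 0
        else PySem.List.pyGetD st.1 ((m:Int)-1) 0 + PySem.List.pyGetD nums (m:Int) 0)
        = pvPref nums (m+1) := by
      by_cases hm : m = 0
      · subst hm
        have h0 : PySem.List.pyGetD nums ((0:Nat):Int) 0 = nums.getD 0 0 :=
          PySem.List.pyGetD_natCast nums 0 0
        simp only [Nat.cast_zero] at h0
        simp only [Nat.cast_zero, BEq.rfl, if_true, h0, pvPref_succ]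
        simp [pvPref]
      · have hm1 : ((m:Int) == 0) = false := by simp; omega
        rw [hm1]
        simp only [Bool.false_eq_true, if_false]
        have : (m:Int) - 1 = ((m-1 : Nat) : Int) := by omega
        rw [this, PySem.List.pyGetD_natCast, PySem.List.pyGetD_natCast, h1,
          pvAcc_getD nums m (m-1) (by omega)]
        have : m - 1 + 1 = m := by omega
        rw [this, pvPref_succ]
    constructor
    · show (st.1 ++ [_], _).1 = _
      rw [hv, h1]
      simp [pvAcc, List.range_succ]
    · show pvDInv nums (m+1) (st.1 ++ [_], if st.2.contains _ then st.2 else st.2.insert _ (m:Int)).2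
      rw [hv]
      exact pvDInv_step nums m st.2 h2

/-- A's second loop computes `pvRes` with the full-bound lookup. -/
lemma portA_loop2 (nums : List Int) (k : Int) (d : PySem.Dict Int Int)
    (hd : pvDInv nums nums.length d) (m : Nat) (hm : m ≤ nums.length) :
    (List.range m).foldl (fun r (j : Nat) =>
        match d.get? (PySem.List.pyGetD (pvAcc nums nums.length) (j:Int) 0 - k) with
        | some mm => max r ((j:Int) - mm)
        | none => r) 0
      = pvRes nums k (fun _ => nums.length) m := by
  induction m with
  | zero => rfl
  | succ m ih =>
    rw [List.range_succ, List.foldl_append, ih (by omega), pvRes_succ]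
    simp only [List.foldl_cons, List.foldl_nil]
    rw [PySem.List.pyGetD_natCast, pvAcc_getD nums nums.length m (by omega), hd]
    cases pvFirst nums nums.length (pvPref nums (m+1) - k) <;> rfl

/-- B's loop invariant: result, running sum, dict. -/
lemma portB_loop (nums : List Int) (k : Int) (m : Nat) (hm : m ≤ nums.length) :
    ((List.range m).foldl (fun st (j : Nat) => pvStepB k st ((j:Int), nums.getD j 0))
        (0, 0, (PySem.Dict.empty : PySem.Dict Int Int).insert 0 (-1))).1
      = pvRes nums k id m ∧
    ((List.range m).foldl (fun st (j : Nat) => pvStepB k st ((j:Int), nums.getD j 0))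
        (0, 0, (PySem.Dict.empty : PySem.Dict Int Int).insert 0 (-1))).2.1
      = pvPref nums m ∧
    pvDInv nums m ((List.range m).foldl (fun st (j : Nat) => pvStepB k st ((j:Int), nums.getD j 0))
        (0, 0, (PySem.Dict.empty : PySem.Dict Int Int).insert 0 (-1))).2.2 := by
  induction m with
  | zero => exact ⟨rfl, rfl, pvDInv_zero nums⟩
  | succ m ih =>
    obtain ⟨h1, h2, h3⟩ := ih (by omega)
    rw [List.range_succ, List.foldl_append]
    set st := (List.range m).foldl (fun st (j : Nat) => pvStepB k st ((j:Int), nums.getD j 0))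
        (0, 0, (PySem.Dict.empty : PySem.Dict Int Int).insert 0 (-1)) with hst
    simp only [List.foldl_cons, List.foldl_nil]
    have hs : st.2.1 + nums.getD m 0 = pvPref nums (m+1) := by rw [h2, pvPref_succ]
    refine ⟨?_, ?_, ?_⟩
    · show (match st.2.2.get? (st.2.1 + nums.getD m 0 - k) with
        | some mm => max st.1 ((m:Int) - mm) | none => st.1) = pvRes nums k id (m+1)
      rw [hs, h3, h1, pvRes_succ]
      simp only [id_eq]
      cases hf : pvFirst nums m (pvPref nums (m+1) - k) <;> simp
    · show st.2.1 + nums.getD m 0 = pvPref nums (m+1)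
      exact hs
    · show pvDInv nums (m+1) (if st.2.2.contains (st.2.1 + nums.getD m 0) then st.2.2
        else st.2.2.insert (st.2.1 + nums.getD m 0) (m:Int))
      rw [hs]
      exact pvDInv_step nums m st.2.2 h3

lemma pvRes_nonneg (nums : List Int) (k : Int) (bnd : Nat → Nat) (m : Nat) :
    0 ≤ pvRes nums k bnd m := by
  induction m with
  | zero => exact le_refl 0
  | succ m ih =>
    rw [pvRes_succ]
    cases pvFirst nums (bnd m) (pvPref nums (m+1) - k) with
    | some j => exact le_trans ih (le_max_left _ _)
    | none => exact ih

/-- The full-map lookup and the incremental lookup give the same result fold. -/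
lemma pvRes_const_eq_id (nums : List Int) (k : Int) (m : Nat) (hm : m ≤ nums.length) :
    pvRes nums k (fun _ => nums.length) m = pvRes nums k id m := by
  induction m with
  | zero => rfl
  | succ m ih =>
    rw [pvRes_succ, pvRes_succ, ih (by omega)]
    simp only [id]
    cases hf : pvFirst nums m (pvPref nums (m+1) - k) with
    | some j =>
      rw [pvFirst_mono nums m nums.length _ j (by omega) hf]
    | none =>
      cases hg : pvFirst nums nums.length (pvPref nums (m+1) - k) with
      | none => rfl
      | some j =>
        obtain ⟨hj1, hj2⟩ := pvFirst_eq_some nums nums.length _ j hg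
        have hjm : m < j := by
          by_contra hle
          exact pvFirst_eq_none nums m _ hf j (by omega) hj2
        have hle : (m:Int) - ((j:Int) - 1) ≤ 0 := by omega
        show max (pvRes nums k id m) ((m:Int) - ((j:Int) - 1)) = pvRes nums k id m
        exact max_eq_left (le_trans hle (pvRes_nonneg nums k id m))

lemma portA_loop2' (nums : List Int) (k : Int) (p : List Int × PySem.Dict Int Int)
    (hacc : p.1 = pvAcc nums nums.length) (hd : pvDInv nums nums.length p.2) :
    (PySem.List.pyRange 0 ((nums.length : Nat) : Int) 1).foldl
      (fun res i =>
        match p.2.get? (PySem.List.pyGetD p.1 i 0 - k) with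
        | some m => max res (i - m)
        | none => res) 0
      = pvRes nums k (fun _ => nums.length) nums.length := by
  rw [PySem.List.pyRange_one, List.foldl_map]
  have hn : (((nums.length : Nat) : Int) - 0).toNat = nums.length := by omega
  rw [hn]
  calc (List.range nums.length).foldl (fun res (j : Nat) =>
        match p.2.get? (PySem.List.pyGetD p.1 (0 + (j:Int)) 0 - k) with
        | some m => max res (0 + (j:Int) - m)
        | none => res) 0
      = (List.range nums.length).foldl (fun res (j : Nat) =>
        match p.2.get? (PySem.List.pyGetD (pvAcc nums nums.length) ((j:Int)) 0 - k) with
        | some mm => max res ((j:Int) - mm)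
        | none => res) 0 := by
        congr 1; funext res j; rw [zero_add, hacc]
    _ = pvRes nums k (fun _ => nums.length) nums.length :=
        portA_loop2 nums k p.2 hd nums.length (le_refl _)

lemma portA_eq (nums : List Int) (k : Int) :
    maxSubArrayLen_II nums k = pvRes nums k (fun _ => nums.length) nums.length := by
  by_cases h : nums = []
  · subst h; rfl
  · rw [maxSubArrayLen_II, if_neg h]
    show (let p : List Int × PySem.Dict Int Int := (PySem.List.pyRange 0 ((nums.length : Nat) : Int) 1).foldl (pvStepA nums) ([], (PySem.Dict.empty : PySem.Dict Int Int).insert 0 (-1))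
      (PySem.List.pyRange 0 ((nums.length : Nat) : Int) 1).foldl
        (fun res i =>
          match p.2.get? (PySem.List.pyGetD p.1 i 0 - k) with
          | some m => max res (i - m)
          | none => res) 0) = pvRes nums k (fun _ => nums.length) nums.length
    have e1 : (PySem.List.pyRange 0 ((nums.length : Nat) : Int) 1).foldl (pvStepA nums)
        ([], (PySem.Dict.empty : PySem.Dict Int Int).insert 0 (-1)) = pvLoop1 nums nums.length := by
      rw [PySem.List.pyRange_one, List.foldl_map]
      have hn : (((nums.length : Nat) : Int) - 0).toNat = nums.length := by omega
      rw [hn, pvLoop1]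
      congr 1; funext st j; rw [zero_add]
    rw [e1]
    exact portA_loop2' nums k (pvLoop1 nums nums.length)
      (portA_loop1 nums nums.length).1 (portA_loop1 nums nums.length).2

lemma portB_eq (nums : List Int) (k : Int) :
    maxSubArrayLen_II_alt nums k = pvRes nums k id nums.length := by
  show ((PySem.List.enumerate nums).foldl (pvStepB k)
      (0, 0, (PySem.Dict.empty : PySem.Dict Int Int).insert 0 (-1))).1
    = pvRes nums k id nums.length
  have e : (PySem.List.enumerate nums).foldl (pvStepB k)
      (0, 0, (PySem.Dict.empty : PySem.Dict Int Int).insert 0 (-1))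
      = (List.range nums.length).foldl (fun st (j : Nat) => pvStepB k st ((j:Int), nums.getD j 0))
        (0, 0, (PySem.Dict.empty : PySem.Dict Int Int).insert 0 (-1)) := by
    rw [PySem.List.enumerate_eq_map_pyRange nums (0:Int), List.foldl_map,
      PySem.List.pyRange_one, List.foldl_map]
    have hn : ((PySem.List.len nums) - 0).toNat = nums.length := by
      simp [PySem.List.len_eq]
    rw [hn]
    congr 1; funext st j
    rw [zero_add, PySem.List.pyGetD_natCast]
  rw [e]
  exact (portB_loop nums k nums.length (le_refl _)).1

-- ===== VERDICT (by name: the statement is the Claim_ definition above) =====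
theorem maxSubArrayLen_II_spec : Claim_equal_maxSubArrayLen_II := by
  intro nums k _
  show maxSubArrayLen_II nums k = maxSubArrayLen_II_alt nums k
  rw [portA_eq, portB_eq, pvRes_const_eq_id nums k nums.length (le_refl _)]
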